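-- pv_equiv track=rewrite | github.com/miliar/Code_Jam_Webscraper | solutions_python/Problem_156/444.py | solve
-- ===== SOURCE A (Python) =====
-- def solve(P):
-- 	R = list(P)
-- 	R.sort(reverse=True)
-- 	if R[0] <= 3:
-- 		return R[0]
--
-- 	Q = [x-1 for x in R if (x-1) > 0]
--
-- 	R.append(R[0]//2)
-- 	R[0] = R[0]//2 + R[0]%2
--
-- 	return 1 + min(solve(R), solve(Q))
-- ===== SOURCE B (Python) =====
-- def solve(P):
--     m = max(P)
--     if m <= 3:
--         return m
--
--     def splits(p, E):
--         # halving splits needed until every piece of a stack of p is at most E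
--         if p <= E:
--             return 0
--         h = p // 2
--         return 1 + splits(p - h, E) + splits(h, E)
--
--     best = None
--     for E in range(1, m + 1):
--         c = E + sum(splits(p, E) for p in P if p > 0)
--         if best is None or c < best:
--             best = c
--     return best
-- ===== Notes on version B (the rewrite author's own statement) =====
-- stated objective: alternative
-- what changed: Replaces A's two-way branching recursion over whole pancake multisets (eat-all vs split-the-max, recursing on both) by a direct minimisation over the number E of eat steps: answer = min over E in 1..max(P) of E + sum of halving-splits needed to bring every stack to at most E, computed per stack independently.
import Mathlib
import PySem

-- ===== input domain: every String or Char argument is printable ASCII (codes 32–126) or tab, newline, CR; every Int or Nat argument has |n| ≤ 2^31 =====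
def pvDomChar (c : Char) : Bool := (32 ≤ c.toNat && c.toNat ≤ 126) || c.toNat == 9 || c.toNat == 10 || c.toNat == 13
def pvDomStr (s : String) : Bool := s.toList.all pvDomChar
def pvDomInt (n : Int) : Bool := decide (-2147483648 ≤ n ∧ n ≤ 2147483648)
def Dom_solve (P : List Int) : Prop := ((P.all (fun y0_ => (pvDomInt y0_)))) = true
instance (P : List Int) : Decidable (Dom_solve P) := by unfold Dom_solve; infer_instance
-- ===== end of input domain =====

-- B replaces A's two-way branching recursion over whole pancake multisets (eat-all vs split-the-max)
-- by a direct minimisation over the number E of eat steps: min over E of E + (halving splits to cap every stack at E).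

-- ===== PORT A =====
-- termination measure for A's recursion: sum of squares of the nonnegative parts
def pvMeas (P : List Int) : Nat := (P.map (fun p => p.toNat * p.toNat)).sum

lemma pvMeas_perm (l1 l2 : List Int) (h : l1.Perm l2) : pvMeas l1 = pvMeas l2 :=
  (h.map _).sum_eq

lemma pvMeas_sorted (P : List Int) : pvMeas (PySem.List.sorted P (fun x => x) true) = pvMeas P :=
  pvMeas_perm _ _ (PySem.List.sorted_perm P (fun x => x) true)

lemma fd2 (p : Int) : PySem.Int.floordiv p 2 = p / 2 :=
  PySem.Int.floordiv_eq_ediv_of_pos (by norm_num)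

lemma md2 (p : Int) : PySem.Int.mod p 2 = p % 2 :=
  PySem.Int.mod_eq_emod_of_pos (by norm_num)

lemma pvMeas_split (r0 : Int) (rest : List Int) (h : ¬ r0 ≤ 3) :
    pvMeas ((PySem.Int.floordiv r0 2 + PySem.Int.mod r0 2) :: (rest ++ [PySem.Int.floordiv r0 2]))
      < pvMeas (r0 :: rest) := by
  simp only [pvMeas, List.map_cons, List.map_append, List.sum_cons, List.sum_append,
    List.map_nil, List.sum_nil, fd2, md2]
  have h4 : 4 ≤ r0 := by omega
  have hx : 2 ≤ (r0 / 2 + r0 % 2).toNat := by omega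
  have hy : 2 ≤ (r0 / 2).toNat := by omega
  have hs : (r0 / 2 + r0 % 2).toNat + (r0 / 2).toNat = r0.toNat := by omega
  set x := (r0 / 2 + r0 % 2).toNat
  set y := (r0 / 2).toNat
  rw [← hs]
  nlinarith [Nat.mul_le_mul hx hy]

lemma pvMeas_eat (r0 : Int) (rest : List Int) (h : ¬ r0 ≤ 3) :
    pvMeas ((r0 :: rest).filterMap (fun x => if 0 < x - 1 then some (x - 1) else none))
      < pvMeas (r0 :: rest) := by
  have hle : ∀ l : List Int,
      pvMeas (l.filterMap (fun x => if 0 < x - 1 then some (x - 1) else none)) ≤ pvMeas l := by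
    intro l
    induction l with
    | nil => exact le_rfl
    | cons x l ih =>
      simp only [pvMeas, List.map_cons, List.sum_cons] at *
      simp only [List.filterMap_cons]
      split
      · omega
      · next b heq =>
        have hb : b = x - 1 ∧ 0 < x - 1 := by
          split at heq
          · injection heq with h; exact ⟨h.symm, by assumption⟩
          · simp at heq
        obtain ⟨rfl, hx⟩ := hb
        simp only [List.map_cons, List.sum_cons]
        have : (x - 1).toNat * (x - 1).toNat ≤ x.toNat * x.toNat :=
          Nat.mul_le_mul (by omega) (by omega)
        omega
  have hx : (0:Int) < r0 - 1 := by omega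
  simp only [List.filterMap_cons, if_pos hx]
  simp only [pvMeas, List.map_cons, List.sum_cons]
  have h1 : (r0 - 1).toNat * (r0 - 1).toNat < r0.toNat * r0.toNat :=
    Nat.mul_lt_mul_of_lt_of_le (by omega) (by omega) (by omega)
  have := hle rest
  simp only [pvMeas] at this
  omega

def solve (P : List Int) : Int :=
  match hs : PySem.List.sorted P (fun x => x) true with    -- R = list(P); R.sort(reverse=True)
  | [] => 0                                                -- unreachable under Pre_solve: Python raises IndexError on R[0]
  | r0 :: rest =>
    if h3 : r0 ≤ 3 then r0
    else
      -- Q = [x-1 for x in R if (x-1) > 0]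
      let Q := (r0 :: rest).filterMap (fun x => if 0 < x - 1 then some (x - 1) else none)
      -- R.append(R[0]//2); R[0] = R[0]//2 + R[0]%2   (rendered on the matched cons cell)
      1 + min (solve ((PySem.Int.floordiv r0 2 + PySem.Int.mod r0 2) :: (rest ++ [PySem.Int.floordiv r0 2])))
              (solve Q)
termination_by pvMeas P
decreasing_by
  · exact lt_of_lt_of_eq (pvMeas_split r0 rest h3) (by rw [← hs]; exact pvMeas_sorted P)
  · exact lt_of_lt_of_eq (pvMeas_eat r0 rest h3) (by rw [← hs]; exact pvMeas_sorted P)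

-- ===== PORT B =====
-- splits(p, E): halving splits until every piece of a stack of p is at most E
def sc (p E : Int) : Int :=
  if p ≤ E then 0
  else if E ≤ 0 then 0   -- totality guard only; solve_alt calls sc exclusively with 1 ≤ E, where it is unreachable
  else 1 + sc (p - PySem.Int.floordiv p 2) E + sc (PySem.Int.floordiv p 2) E
termination_by p.toNat
decreasing_by
  · rw [PySem.Int.floordiv_eq_ediv_of_pos (by norm_num)]; omega
  · rw [PySem.Int.floordiv_eq_ediv_of_pos (by norm_num)]; omega

-- the loop body of Source B's 'if best is None or c < best: best = c'
def pvStep (c : Int) (best : Option Int) : Option Int :=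
  match best with
  | none => some c
  | some b => if c < b then some c else some b

-- Source B's 'for E in ...' loop over candidate costs
def pvBest (f : Int → Int) (l : List Int) : Option Int :=
  l.foldl (fun best E => pvStep (f E) best) none

def solve_alt (P : List Int) : Int :=
  match PySem.List.max? P (fun x => x) with                -- m = max(P); unreachable none: Python raises ValueError
  | none => 0
  | some m =>
    if m ≤ 3 then m
    else
      (pvBest (fun E => E + ((P.filter (fun p => 0 < p)).map (fun p => sc p E)).sum)
              (PySem.List.pyRange 1 (m + 1) 1)).getD 0

-- ===== PRECONDITION & SPEC =====
-- Pre_solve excludes only the empty list, on which A raises IndexError (and B's max(P) raises ValueError).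
def Pre_solve (P : List Int) : Prop := P ≠ []
instance (P : List Int) : Decidable (Pre_solve P) := by unfold Pre_solve; infer_instance

def pvWitness_solve : List Int := [4, 2]

def Spec_solve (P : List Int) (out : Int) : Prop := out = solve_alt P
instance (P : List Int) (out : Int) : Decidable (Spec_solve P out) := by unfold Spec_solve; infer_instance

-- ===== CLAIM (what is proved, stated in full; the proofs are below) =====
def Claim_equal_solve : Prop := ∀ (P : List Int), Dom_solve P → Pre_solve P → Spec_solve P (solve P)

-- ===== LEMMAS AND PROOFS =====

lemma sc_of_le (p E : Int) (h : p ≤ E) : sc p E = 0 := by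
  rw [sc]; simp [h]

lemma sc_guard (p E : Int) (h : ¬ p ≤ E) (h2 : E ≤ 0) : sc p E = 0 := by
  rw [sc]; simp [h, h2]

lemma sc_rec (p E : Int) (hE : 1 ≤ E) (hp : E < p) :
    sc p E = 1 + sc (p - PySem.Int.floordiv p 2) E + sc (PySem.Int.floordiv p 2) E := by
  rw [sc]; simp [not_le.mpr hp, (show ¬ E ≤ 0 by omega)]

lemma sc_nonneg_aux : ∀ (n : Nat) (p E : Int), p.toNat ≤ n → 0 ≤ sc p E := by
  intro n
  induction n with
  | zero =>
    intro p E h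
    by_cases hpE : p ≤ E
    · rw [sc_of_le _ _ hpE]
    · rw [sc_guard _ _ hpE (by omega)]
  | succ n ih =>
    intro p E h
    by_cases hpE : p ≤ E
    · rw [sc_of_le _ _ hpE]
    · by_cases hE : E ≤ 0
      · rw [sc_guard _ _ hpE hE]
      · rw [sc_rec p E (by omega) (by omega), fd2]
        have h1 := ih (p - p / 2) E (by omega)
        have h2 := ih (p / 2) E (by omega)
        linarith

lemma sc_nonneg (p E : Int) : 0 ≤ sc p E := sc_nonneg_aux p.toNat p E le_rfl

lemma sc_mono_aux : ∀ (n : Nat) (p E E' : Int), p.toNat ≤ n → 1 ≤ E → E ≤ E' →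
    sc p E' ≤ sc p E := by
  intro n
  induction n with
  | zero =>
    intro p E E' h hE hEE
    rw [sc_of_le p E' (by omega), sc_of_le p E (by omega)]
  | succ n ih =>
    intro p E E' h hE hEE
    by_cases hp' : p ≤ E'
    · rw [sc_of_le p E' hp']; exact sc_nonneg p E
    · rw [sc_rec p E' (by omega) (by omega), sc_rec p E hE (by omega), fd2]
      have h1 := ih (p - p / 2) E E' (by omega) hE hEE
      have h2 := ih (p / 2) E E' (by omega) hE hEE
      linarith

lemma sc_mono (p E E' : Int) (hE : 1 ≤ E) (hEE : E ≤ E') : sc p E' ≤ sc p E :=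
  sc_mono_aux p.toNat p E E' le_rfl hE hEE

lemma sc_shift_aux : ∀ (n : Nat) (p E : Int), p.toNat ≤ n → 1 ≤ E →
    sc p (E + 1) ≤ sc (p - 1) E := by
  intro n
  induction n with
  | zero =>
    intro p E h hE
    rw [sc_of_le p (E + 1) (by omega)]; exact sc_nonneg _ _
  | succ n ih =>
    intro p E h hE
    by_cases hp : p ≤ E + 1
    · rw [sc_of_le p (E + 1) hp]; exact sc_nonneg _ _
    · rw [sc_rec p (E + 1) (by omega) (by omega), sc_rec (p - 1) E hE (by omega), fd2, fd2]
      have e1 : p - p / 2 = (p - 1) / 2 + 1 := by omega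
      have h1 : sc (p - p / 2) (E + 1) ≤ sc ((p - 1) / 2) E := by
        rw [e1]
        have := ih ((p - 1) / 2 + 1) E (by omega) hE
        simpa using this
      have h2 : sc (p / 2) (E + 1) ≤ sc (p - 1 - (p - 1) / 2) E := by
        rw [show p - 1 - (p - 1) / 2 = p / 2 by omega]
        exact sc_mono _ E (E + 1) hE (by omega)
      linarith

lemma sc_shift (p E : Int) (hE : 1 ≤ E) : sc p (E + 1) ≤ sc (p - 1) E :=
  sc_shift_aux p.toNat p E le_rfl hE

-- G E P is exactly the summed cost Source B computes for candidate E
def G (E : Int) (P : List Int) : Int := ((P.filter (fun p => 0 < p)).map (fun p => sc p E)).sum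

lemma G_nil (E : Int) : G E [] = 0 := rfl

lemma G_cons_pos (E x : Int) (l : List Int) (h : 0 < x) : G E (x :: l) = sc x E + G E l := by
  simp [G, h]

lemma G_cons_nonpos (E x : Int) (l : List Int) (h : ¬ 0 < x) : G E (x :: l) = G E l := by
  simp [G, h]

lemma G_append (E : Int) (l1 l2 : List Int) : G E (l1 ++ l2) = G E l1 + G E l2 := by
  simp [G, List.filter_append]

lemma G_perm (E : Int) (l1 l2 : List Int) (h : l1.Perm l2) : G E l1 = G E l2 :=
  ((h.filter _).map _).sum_eq

lemma G_eq_mapsum (E : Int) (P : List Int) :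
    G E P = (P.map (fun x => if 0 < x then sc x E else 0)).sum := by
  induction P with
  | nil => rfl
  | cons x l ih =>
    by_cases h : 0 < x
    · rw [G_cons_pos E x l h]; simp [h, ih]
    · rw [G_cons_nonpos E x l h]; simp [h, ih]

lemma G_nonneg (E : Int) (P : List Int) : 0 ≤ G E P := by
  rw [G_eq_mapsum]
  apply List.sum_nonneg
  intro x hx
  obtain ⟨y, _, rfl⟩ := List.mem_map.mp hx
  split <;> [exact sc_nonneg _ _; exact le_rfl]

lemma G_zero (E : Int) (P : List Int) (h : ∀ x ∈ P, x ≤ E) : G E P = 0 := by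
  rw [G_eq_mapsum]
  apply List.sum_eq_zero
  intro x hx
  obtain ⟨y, hy, rfl⟩ := List.mem_map.mp hx
  split <;> [exact sc_of_le _ _ (h y hy); rfl]

lemma G_ge_member (E m : Int) (P : List Int) (hm : m ∈ P) (h0 : 0 < m) : sc m E ≤ G E P := by
  rw [G_eq_mapsum]
  have hmem : (if 0 < m then sc m E else 0) ∈ P.map (fun x => if 0 < x then sc x E else 0) :=
    List.mem_map_of_mem hm
  have := List.single_le_sum (fun x hx => by
    obtain ⟨y, _, rfl⟩ := List.mem_map.mp hx
    split <;> [exact sc_nonneg _ _; exact le_rfl]) _ hmem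
  simpa [h0] using this

-- the eat step: G of Q dominates G at E+1 of the original list
lemma G_eat (E : Int) (R : List Int) (hE : 1 ≤ E) :
    G (E + 1) R ≤ G E (R.filterMap (fun x => if 0 < x - 1 then some (x - 1) else none)) := by
  have hfm : ∀ (l : List Int),
      G E (l.filterMap (fun x => if 0 < x - 1 then some (x - 1) else none))
        = (l.map (fun x => if 0 < x - 1 then sc (x - 1) E else 0)).sum := by
    intro l
    induction l with
    | nil => rfl
    | cons x l ih =>
      simp only [List.filterMap_cons]
      split
      · next heq =>
        have hx : ¬ 0 < x - 1 := by
          by_contra hc; rw [if_pos hc] at heq; cases heq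
        rw [List.map_cons, List.sum_cons, if_neg hx, zero_add]
        exact ih
      · next b heq =>
        have hb : b = x - 1 ∧ 0 < x - 1 := by
          split at heq
          · injection heq with h'; exact ⟨h'.symm, by assumption⟩
          · cases heq
        obtain ⟨rfl, hx⟩ := hb
        rw [G_cons_pos E _ _ (by omega), List.map_cons, List.sum_cons, if_pos hx, ih]
  rw [hfm, G_eq_mapsum]
  apply List.sum_le_sum
  intro x _
  by_cases h1 : 0 < x - 1
  · have h0 : 0 < x := by omega
    simp only [if_pos h0, if_pos h1]
    exact sc_shift x E hE
  · by_cases h0 : 0 < x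
    · simp only [if_pos h0, if_neg h1]
      rw [sc_of_le x (E + 1) (by omega)]
    · rw [if_neg h0, if_neg h1]

-- pvBest computes a value that is a lower bound of f on l and attained on l
lemma pvBest_go (f : Int → Int) (xs : List Int) : ∀ (b : Int),
    ∃ r, xs.foldl (fun best E => pvStep (f E) best) (some b) = some r ∧ r ≤ b ∧
      (∀ x ∈ xs, r ≤ f x) ∧ (r = b ∨ ∃ x ∈ xs, r = f x) := by
  induction xs with
  | nil => exact fun b => ⟨b, rfl, le_rfl, by simp, Or.inl rfl⟩
  | cons x l ih =>
    intro b
    by_cases hc : f x < b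
    · obtain ⟨r, hr, hrb, hall, hor⟩ := ih (f x)
      refine ⟨r, ?_, by linarith, ?_, ?_⟩
      · simpa [List.foldl_cons, pvStep, hc] using hr
      · intro y hy
        rcases List.mem_cons.mp hy with rfl | hy
        · exact hrb
        · exact hall y hy
      · rcases hor with h | ⟨y, hy, hr'⟩
        · exact Or.inr ⟨x, List.mem_cons_self, h⟩
        · exact Or.inr ⟨y, List.mem_cons_of_mem x hy, hr'⟩
    · obtain ⟨r, hr, hrb, hall, hor⟩ := ih b
      refine ⟨r, ?_, hrb, ?_, ?_⟩
      · simpa [List.foldl_cons, pvStep, hc] using hr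
      · intro y hy
        rcases List.mem_cons.mp hy with rfl | hy
        · exact hrb.trans (not_lt.mp hc)
        · exact hall y hy
      · rcases hor with h | ⟨y, hy, hr'⟩
        · exact Or.inl h
        · exact Or.inr ⟨y, List.mem_cons_of_mem x hy, hr'⟩

lemma pvBest_spec (f : Int → Int) (l : List Int) (hl : l ≠ []) :
    ∃ r, pvBest f l = some r ∧ (∀ x ∈ l, r ≤ f x) ∧ (∃ x ∈ l, r = f x) := by
  cases l with
  | nil => exact absurd rfl hl
  | cons x xs =>
    obtain ⟨r, hr, hrfx, hall, hor⟩ := pvBest_go f xs (f x)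
    refine ⟨r, ?_, ?_, ?_⟩
    · simpa [pvBest, List.foldl_cons, pvStep] using hr
    · intro y hy
      rcases List.mem_cons.mp hy with rfl | hy
      · exact hrfx
      · exact hall y hy
    · rcases hor with h | ⟨y, hy, hr'⟩
      · exact ⟨x, List.mem_cons_self, h⟩
      · exact ⟨y, List.mem_cons_of_mem x hy, hr'⟩

lemma max_eq_of (l : List Int) (a : Int) (ha : a ∈ l) (hb : ∀ y ∈ l, y ≤ a) :
    PySem.List.max? l (fun x => x) = some a := by
  cases h : PySem.List.max? l (fun x => x) with
  | none => exact absurd ((PySem.List.max?_eq_none_iff l (fun x => x)).mp h ▸ ha) (List.not_mem_nil)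
  | some m =>
    have h1 : m ∈ l := PySem.List.max?_mem h
    have h2 : a ≤ m := PySem.List.max?_isMax h a ha
    have h3 : m ≤ a := hb m h1
    rw [le_antisymm h3 h2]

lemma sc21 : sc 2 1 = 1 := by
  rw [sc_rec 2 1 (by norm_num) (by norm_num), fd2]
  norm_num [sc_of_le]

lemma sc31 : sc 3 1 = 2 := by
  rw [sc_rec 3 1 (by norm_num) (by norm_num), fd2]
  norm_num [sc21, sc_of_le]

lemma sc32 : sc 3 2 = 1 := by
  rw [sc_rec 3 2 (by norm_num) (by norm_num), fd2]
  norm_num [sc_of_le]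

lemma alt_base (P : List Int) (m : Int) (hm : PySem.List.max? P (fun x => x) = some m)
    (h3 : m ≤ 3) : solve_alt P = m := by
  simp [solve_alt, hm, h3]

lemma alt_le (P : List Int) (m : Int) (hm : PySem.List.max? P (fun x => x) = some m)
    (h1 : 1 ≤ m) : ∀ E, 1 ≤ E → solve_alt P ≤ E + G E P := by
  intro E hE
  have hmax : ∀ x ∈ P, x ≤ m := PySem.List.max?_isMax hm
  have hmem : m ∈ P := PySem.List.max?_mem hm
  by_cases h3 : m ≤ 3
  · rw [alt_base P m hm h3]
    by_cases hEm : m ≤ E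
    · have := G_nonneg E P; linarith
    · have hscm : sc m E ≤ G E P := G_ge_member E m P hmem (by omega)
      have hcase : (E = 1 ∧ m = 2) ∨ (E = 1 ∧ m = 3) ∨ (E = 2 ∧ m = 3) := by omega
      have hval : m ≤ E + sc m E := by
        rcases hcase with ⟨rfl, rfl⟩ | ⟨rfl, rfl⟩ | ⟨rfl, rfl⟩
        · rw [sc21]; norm_num
        · rw [sc31]; norm_num
        · rw [sc32]; norm_num
      linarith
  · simp only [solve_alt, hm, if_neg h3]
    have hne : PySem.List.pyRange 1 (m + 1) 1 ≠ [] :=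
      List.ne_nil_of_mem (PySem.List.mem_pyRange_one.mpr ⟨le_rfl, by omega⟩)
    obtain ⟨r, hr, hlb, -⟩ :=
      pvBest_spec (fun E => E + ((P.filter (fun p => 0 < p)).map (fun p => sc p E)).sum) _ hne
    rw [hr, Option.getD_some]
    by_cases hEm : E ≤ m
    · exact hlb E (PySem.List.mem_pyRange_one.mpr ⟨hE, by omega⟩)
    · have hrm : r ≤ m + G m P := hlb m (PySem.List.mem_pyRange_one.mpr ⟨by omega, by omega⟩)
      have hz : G m P = 0 := G_zero m P hmax
      have hg := G_nonneg E P
      show r ≤ E + G E P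
      omega

lemma alt_attain (P : List Int) (m : Int) (hm : PySem.List.max? P (fun x => x) = some m)
    (h1 : 1 ≤ m) : ∃ E, 1 ≤ E ∧ E ≤ m ∧ solve_alt P = E + G E P := by
  have hmax : ∀ x ∈ P, x ≤ m := PySem.List.max?_isMax hm
  by_cases h3 : m ≤ 3
  · refine ⟨m, h1, le_rfl, ?_⟩
    rw [alt_base P m hm h3, G_zero m P hmax]
    ring
  · simp only [solve_alt, hm, if_neg h3]
    have hne : PySem.List.pyRange 1 (m + 1) 1 ≠ [] :=
      List.ne_nil_of_mem (PySem.List.mem_pyRange_one.mpr ⟨le_rfl, by omega⟩)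
    obtain ⟨r, hr, -, x, hx, hrx⟩ :=
      pvBest_spec (fun E => E + ((P.filter (fun p => 0 < p)).map (fun p => sc p E)).sum) _ hne
    obtain ⟨hx1, hx2⟩ := PySem.List.mem_pyRange_one.mp hx
    exact ⟨x, hx1, by omega, by rw [hr, Option.getD_some]; exact hrx⟩

lemma solve_eq_aux : ∀ (n : Nat) (P : List Int), pvMeas P ≤ n → P ≠ [] → solve P = solve_alt P := by
  intro n
  induction n using Nat.strong_induction_on with
  | _ n ih =>
  intro P hn hne
  rw [solve.eq_def]
  split
  · next hs => exact absurd ((PySem.List.sorted_eq_nil_iff P (fun x => x) true).mp hs) hne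
  · next r0 rest hs =>
    have hperm : (r0 :: rest).Perm P := by
      have := PySem.List.sorted_perm P (fun x => x) true
      rwa [hs] at this
    have hmaxall : ∀ y ∈ P, y ≤ r0 := PySem.List.key_head_sorted_rev_ge P (fun x => x) hs
    have hr0P : r0 ∈ P := hperm.subset List.mem_cons_self
    have hm : PySem.List.max? P (fun x => x) = some r0 := max_eq_of P r0 hr0P hmaxall
    by_cases h3 : r0 ≤ 3
    · rw [dif_pos h3, alt_base P r0 hm h3]
    · rw [dif_neg h3]
      show 1 + min
          (solve ((PySem.Int.floordiv r0 2 + PySem.Int.mod r0 2) :: (rest ++ [PySem.Int.floordiv r0 2])))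
          (solve ((r0 :: rest).filterMap (fun x => if 0 < x - 1 then some (x - 1) else none)))
          = solve_alt P
      have hsp := pvMeas_split r0 rest h3
      rw [fd2, md2]
      rw [fd2, md2] at hsp
      set Qe := (r0 :: rest).filterMap (fun x => if 0 < x - 1 then some (x - 1) else none) with hQdef
      set a := r0 / 2 + r0 % 2 with hadef
      set b := r0 / 2 with hbdef
      set R2e := a :: (rest ++ [b]) with hR2def
      have hfacts : a + b = r0 ∧ 2 ≤ a ∧ 2 ≤ b ∧ a ≤ r0 - 2 ∧ b ≤ r0 - 2 := by omega
      obtain ⟨hab, ha2, hb2, haU, hbU⟩ := hfacts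
      have hmP : pvMeas (r0 :: rest) = pvMeas P := pvMeas_perm _ _ hperm
      have hmQ : pvMeas Qe < pvMeas P := by
        have h' := pvMeas_eat r0 rest h3
        rw [← hQdef] at h'
        omega
      have hmR2 : pvMeas R2e < pvMeas P := by omega
      have hQub : ∀ y ∈ Qe, y ≤ r0 - 1 := by
        intro y hy
        obtain ⟨x, hx, hxe⟩ := List.mem_filterMap.mp hy
        have hxP : x ≤ r0 := hmaxall x (hperm.subset hx)
        split at hxe
        · injection hxe with h'; omega
        · cases hxe
      have hQne : Qe ≠ [] :=
        List.ne_nil_of_mem (List.mem_filterMap.mpr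
          ⟨r0, List.mem_cons_self, by rw [if_pos (show (0:Int) < r0 - 1 by omega)]⟩)
      have hsQ : solve Qe = solve_alt Qe := ih (pvMeas Qe) (by omega) Qe le_rfl hQne
      have hsR2 : solve R2e = solve_alt R2e :=
        ih (pvMeas R2e) (by omega) R2e le_rfl (by simp [hR2def])
      have hmQmax : PySem.List.max? Qe (fun x => x) = some (r0 - 1) := by
        apply max_eq_of
        · exact List.mem_filterMap.mpr
            ⟨r0, List.mem_cons_self, by rw [if_pos (show (0:Int) < r0 - 1 by omega)]⟩
        · exact hQub
      obtain ⟨m2, hm2⟩ : ∃ m2, PySem.List.max? R2e (fun x => x) = some m2 := by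
        cases h : PySem.List.max? R2e (fun x => x) with
        | none => exact absurd ((PySem.List.max?_eq_none_iff R2e (fun x => x)).mp h) (by simp [hR2def])
        | some m2 => exact ⟨m2, rfl⟩
      have hm2mem : m2 ∈ R2e := PySem.List.max?_mem hm2
      have hm2ub : m2 ≤ r0 := by
        rcases List.mem_cons.mp hm2mem with rfl | hmem
        · omega
        · rcases List.mem_append.mp hmem with h | h
          · exact hmaxall _ (hperm.subset (List.mem_cons_of_mem _ h))
          · have : m2 = b := by simpa using h
            omega
      have hm2lb : 2 ≤ m2 :=
        le_trans ha2 (PySem.List.max?_isMax hm2 a List.mem_cons_self)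
      have leP := alt_le P r0 hm (by omega)
      obtain ⟨Ep, hEp1, hEpm, hEpv⟩ := alt_attain P r0 hm (by omega)
      have leQ := alt_le Qe (r0 - 1) hmQmax (by omega)
      obtain ⟨Ee, hEe1, hEem, hEev⟩ := alt_attain Qe (r0 - 1) hmQmax (by omega)
      have leR := alt_le R2e m2 hm2 (by omega)
      obtain ⟨Er, hEr1, hErm, hErv⟩ := alt_attain R2e m2 hm2 (by omega)
      have hGP : ∀ E : Int, G E P = sc r0 E + G E rest := by
        intro E; rw [← G_perm E _ _ hperm, G_cons_pos E _ _ (by omega)]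
      have hGR : ∀ E : Int, G E R2e = sc a E + (G E rest + sc b E) := by
        intro E
        rw [hR2def, G_cons_pos E _ _ (by omega), G_append, G_cons_pos E _ _ (by omega), G_nil,
          add_zero]
      have hsplit : ∀ E : Int, 1 ≤ E → E < r0 → sc r0 E = 1 + sc a E + sc b E := by
        intro E hE hEr
        rw [sc_rec r0 E hE hEr, fd2, show r0 - r0 / 2 = a by omega]
      have heat : ∀ E : Int, 1 ≤ E → G (E + 1) P ≤ G E Qe := by
        intro E hE
        rw [← G_perm (E + 1) _ _ hperm]
        exact G_eat E (r0 :: rest) hE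
      rw [hsQ, hsR2]
      apply le_antisymm
      · rw [hEpv]
        by_cases hc : Ep < r0
        · have h5 : 1 + solve_alt R2e ≤ Ep + G Ep P := by
            have hle := leR Ep hEp1
            have hx1 := hGP Ep
            have hx2 := hGR Ep
            have hx3 := hsplit Ep hEp1 hc
            linarith
          have := min_le_left (solve_alt R2e) (solve_alt Qe)
          linarith
        · have h5 : 1 + solve_alt Qe ≤ Ep + G Ep P := by
            have hlq := leQ (r0 - 1) (by omega)
            have hgz : G (r0 - 1) Qe = 0 := G_zero _ _ hQub
            have hg0 := G_nonneg Ep P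
            linarith
          have := min_le_right (solve_alt R2e) (solve_alt Qe)
          linarith
      · have hA : solve_alt P ≤ 1 + solve_alt R2e := by
          rw [hErv]
          by_cases hc : r0 ≤ Er
          · have h0 : sc r0 Er = 0 := sc_of_le _ _ hc
            have ha0 : sc a Er = 0 := sc_of_le _ _ (by omega)
            have hb0 : sc b Er = 0 := sc_of_le _ _ (by omega)
            have hx1 := leP Er hEr1
            have hx2 := hGP Er
            have hx3 := hGR Er
            linarith
          · have hx1 := leP Er hEr1
            have hx2 := hGP Er
            have hx3 := hGR Er
            have hx4 := hsplit Er hEr1 (by omega)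
            linarith
        have hB : solve_alt P ≤ 1 + solve_alt Qe := by
          rw [hEev]
          have hx1 := leP (Ee + 1) (by omega)
          have hx2 := heat Ee hEe1
          linarith
        rcases le_total (solve_alt R2e) (solve_alt Qe) with hmin | hmin
        · rw [min_eq_left hmin]; exact hA
        · rw [min_eq_right hmin]; exact hB

-- ===== VERDICT (by name: the statement is the Claim_ definition above) =====
theorem solve_spec : Claim_equal_solve := by
  intro P _ hpre
  unfold Spec_solve
  exact solve_eq_aux (pvMeas P) P le_rfl hpre
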